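-- pv_equiv track=rewrite | github.com/daniel-reich/ubiquitous-fiesta | a6XHqehbttHnjE7bK_19.py | is_repdigit
-- ===== SOURCE A (Python) =====
-- def is_repdigit(num):
--   result = []
--   if num < 0: return False
--   for i in range(len(str(num))):
--     if str(num)[i] == str(num)[0]:
--       result.append(True)
--     else:
--       result.append(False)
--   if all(result): return True
--   else: return False
-- ===== SOURCE B (Python) =====
-- def is_repdigit(num):
--   if num < 0: return False
--   d = num % 10
--   num //= 10
--   while num > 0:
--     if num % 10 != d: return False
--     num //= 10
--   return True
-- ===== Notes on version B (the rewrite author's own statement) =====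
-- stated objective: alternative
-- what changed: Replaces the string-based loop (compare each character of str(num) to the first, collect booleans, all()) with a purely arithmetic algorithm: extract the last decimal digit with the modulus and repeatedly floor-divide by the base, returning False as soon as a digit differs; no string, no list, early exit.
import Mathlib
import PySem

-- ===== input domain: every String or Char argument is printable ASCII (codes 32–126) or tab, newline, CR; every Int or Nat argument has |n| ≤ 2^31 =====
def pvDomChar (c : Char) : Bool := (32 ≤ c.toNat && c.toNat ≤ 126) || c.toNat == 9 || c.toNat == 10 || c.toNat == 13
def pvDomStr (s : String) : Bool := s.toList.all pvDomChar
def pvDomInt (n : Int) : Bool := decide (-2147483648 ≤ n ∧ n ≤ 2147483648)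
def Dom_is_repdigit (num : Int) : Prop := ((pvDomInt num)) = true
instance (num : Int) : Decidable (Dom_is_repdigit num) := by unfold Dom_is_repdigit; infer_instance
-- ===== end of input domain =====

-- B drops the string entirely: it extracts decimal digits arithmetically (modulus and
-- floor division) and compares each to the last digit with early exit (objective: alternative).

-- ===== PORT A =====
def is_repdigit (num : Int) : Bool :=
  if num < 0 then false
  else
    let result := (PySem.List.pyRange 0 (PySem.Str.len (PySem.Int.toStr num)) 1).foldl
      (fun acc i =>
        if PySem.Str.pyGet? (PySem.Int.toStr num) i = PySem.Str.pyGet? (PySem.Int.toStr num) 0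
        then acc ++ [true] else acc ++ [false]) []
    if result.all id then true else false

-- ===== PORT B =====
-- the while loop of Source B: compare n's digits to d, dividing by 10, early False
def altLoop (d : Int) (n : Int) : Bool :=
  if _h : 0 < n then
    if PySem.Int.mod n 10 ≠ d then false
    else altLoop d (PySem.Int.floordiv n 10)
  else true
termination_by n.toNat
decreasing_by
  rw [PySem.Int.floordiv_eq_ediv_of_pos (by norm_num : (0:Int) < 10)]
  omega

def is_repdigit_alt (num : Int) : Bool :=
  if num < 0 then false
  else altLoop (PySem.Int.mod num 10) (PySem.Int.floordiv num 10)

-- ===== PRECONDITION & SPEC =====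
def Spec_is_repdigit (num : Int) (out : Bool) : Prop := out = is_repdigit_alt num
instance (num : Int) (out : Bool) : Decidable (Spec_is_repdigit num out) := by unfold Spec_is_repdigit; infer_instance

-- ===== CLAIM (what is proved, stated in full; the proofs are below) =====
def Claim_equal_is_repdigit : Prop := ∀ (num : Int), Dom_is_repdigit num → Spec_is_repdigit num (is_repdigit num)

-- ===== LEMMAS AND PROOFS =====

-- A's loop body, appending one Bool per index, is the map of the per-index test
theorem foldl_ite_append (r : List Int) (p : Int → Bool) (acc : List Bool) :
    r.foldl (fun acc i => if p i = true then acc ++ [true] else acc ++ [false]) acc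
      = acc ++ r.map p := by
  induction r generalizing acc with
  | nil => simp
  | cons x xs ih => simp only [List.foldl_cons, List.map_cons]; split_ifs with h <;>
      simp [ih, h]

-- A's accumulated all() over the character list is the closed comparison with replicate
theorem core (l : List Char) :
    (((PySem.List.pyRange 0 (l.length : Int) 1).foldl
      (fun acc i => if l[i.toNat]? = l[0]? then acc ++ [true] else acc ++ [false]) []).all id)
    = (l == List.replicate l.length (l.headD ' ')) := by
  rw [show (fun (acc : List Bool) (i : Int) => if l[i.toNat]? = l[0]? then acc ++ [true] else acc ++ [false])
        = (fun acc i => if (fun (i : Int) => decide (l[i.toNat]? = l[0]?)) i = true then acc ++ [true] else acc ++ [false])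
      from by funext acc i; simp]
  rw [foldl_ite_append]
  simp only [List.nil_append, List.all_map]
  rw [Bool.eq_iff_iff]
  simp only [List.all_eq_true, PySem.List.mem_pyRange_one, Function.comp, id,
    decide_eq_true_eq, beq_iff_eq, and_imp]
  match l with
  | [] => simp
  | a :: t =>
    simp only [List.headD_cons]
    constructor
    · intro h
      apply List.ext_getElem (by simp)
      intro k hk _
      have := h k (by omega) (by omega)
      simp only [Int.toNat_natCast] at this
      rw [List.getElem?_eq_getElem hk] at this
      simp only [List.getElem?_cons_zero] at this
      simp only [List.getElem_replicate]
      exact Option.some.inj this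
    · intro h i hi0 hilt
      rw [h]
      have hk : i.toNat < (List.replicate (a :: t).length a).length := by
        rw [List.length_replicate]; omega
      rw [List.getElem?_eq_getElem hk, List.getElem?_eq_getElem (by simp)]
      simp

-- A equals the replicate comparison on its character list
theorem A_closed (num : Int) (h : ¬ num < 0) :
    is_repdigit num =
      ((PySem.Int.toStr num).toList ==
        List.replicate (PySem.Int.toStr num).toList.length
          ((PySem.Int.toStr num).toList.headD ' ')) := by
  unfold is_repdigit
  rw [if_neg h]
  dsimp only
  have hget : ∀ (i : Int), 0 ≤ i →
      PySem.Str.pyGet? (PySem.Int.toStr num) i = (PySem.Int.toStr num).toList[i.toNat]? := by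
    intro i hi
    simp only [PySem.Str.pyGet?, PySem.Int.toList_toStr]
    exact PySem.List.pyGet?_of_nonneg _ hi
  have hlen : PySem.Str.len (PySem.Int.toStr num) = ((PySem.Int.toStr num).toList.length : Int) := by
    simp [PySem.Str.len_eq]
  rw [hlen]
  have step : ((PySem.List.pyRange 0 (((PySem.Int.toStr num).toList.length : Int)) 1).foldl
      (fun acc i =>
        if PySem.Str.pyGet? (PySem.Int.toStr num) i = PySem.Str.pyGet? (PySem.Int.toStr num) 0
        then acc ++ [true] else acc ++ [false]) ([] : List Bool))
    = ((PySem.List.pyRange 0 (((PySem.Int.toStr num).toList.length : Int)) 1).foldl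
      (fun acc i =>
        if (PySem.Int.toStr num).toList[i.toNat]? = (PySem.Int.toStr num).toList[0]?
        then acc ++ [true] else acc ++ [false]) []) := by
    apply PySem.List.foldl_congr_mem
    intro acc x hx
    have hx' := PySem.List.mem_pyRange_one.mp hx
    rw [hget x hx'.1, hget 0 le_rfl]
    norm_num
  rw [step, core ((PySem.Int.toStr num).toList)]
  cases ((PySem.Int.toStr num).toList ==
      List.replicate (PySem.Int.toStr num).toList.length ((PySem.Int.toStr num).toList.headD ' ')) <;>
    simp

-- toDigitsCore prepends to its accumulator
theorem tdc_append : ∀ (f n : Nat) (l : List Char),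
    Nat.toDigitsCore 10 f n l = Nat.toDigitsCore 10 f n [] ++ l := by
  intro f
  induction f with
  | zero => intro n l; simp [Nat.toDigitsCore]
  | succ f ih =>
    intro n l
    simp only [Nat.toDigitsCore]
    split_ifs with h
    · rfl
    · rw [ih (n / 10) [Nat.digitChar (n % 10)], ih (n / 10) (Nat.digitChar (n % 10) :: l)]
      simp

-- fuel irrelevance for toDigitsCore with an empty accumulator
theorem tdc_fuel : ∀ (n f f' : Nat), n < f → n < f' →
    Nat.toDigitsCore 10 f n [] = Nat.toDigitsCore 10 f' n [] := by
  intro n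
  induction n using Nat.strong_induction_on with
  | _ n ih =>
    intro f f' hf hf'
    match f, f' with
    | f + 1, f' + 1 =>
      simp only [Nat.toDigitsCore]
      split_ifs with h
      · rfl
      · rw [tdc_append f, tdc_append f']
        have hd : n / 10 < n := Nat.div_lt_self (by omega) (by omega)
        rw [ih (n / 10) hd f f' (by omega) (by omega)]

-- structural peeling of the least significant digit
theorem toDigits_concat (m : Nat) :
    Nat.toDigits 10 m
      = (if m < 10 then [] else Nat.toDigits 10 (m / 10)) ++ [Nat.digitChar (m % 10)] := by
  have hunf : Nat.toDigits 10 m = if m / 10 = 0 then [Nat.digitChar (m % 10)]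
      else Nat.toDigitsCore 10 m (m / 10) [Nat.digitChar (m % 10)] := by
    conv_lhs => rw [Nat.toDigits, Nat.toDigitsCore]
  rw [hunf]
  by_cases h : m < 10
  · rw [if_pos (by omega : m / 10 = 0), if_pos h]; simp
  · rw [if_neg (by omega : ¬ m / 10 = 0), if_neg h, tdc_append m]
    congr 1
    conv_rhs => rw [Nat.toDigits]
    exact tdc_fuel (m / 10) m (m / 10 + 1) (by omega) (by omega)

-- digitChar is injective on digits
theorem digitChar_inj {a b : Nat} (ha : a < 10) (hb : b < 10)
    (h : Nat.digitChar a = Nat.digitChar b) : a = b := by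
  interval_cases a <;> interval_cases b <;> simp_all [Nat.digitChar]

-- Nat mirror of B's loop (proof helper)
def natLoop (d m : Nat) : Bool :=
  if m = 0 then true
  else (decide (m % 10 = d) && natLoop d (m / 10))
termination_by m
decreasing_by exact Nat.div_lt_self (by omega) (by omega)

-- the Int loop of the port computes the Nat mirror
theorem altLoop_natCast : ∀ (m d : Nat), altLoop (d : Int) (m : Int) = natLoop d m := by
  intro m
  induction m using Nat.strong_induction_on with
  | _ m ih =>
    intro d
    rw [altLoop, natLoop]
    by_cases h : m = 0
    · subst h; norm_num
    · rw [dif_pos (by exact_mod_cast Nat.pos_of_ne_zero h), if_neg h]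
      have hmod : PySem.Int.mod (m : Int) 10 = ((m % 10 : Nat) : Int) := by
        exact_mod_cast PySem.Int.mod_natCast m 10
      have hdiv : PySem.Int.floordiv (m : Int) 10 = ((m / 10 : Nat) : Int) := by
        exact_mod_cast PySem.Int.floordiv_natCast m 10
      rw [hmod, hdiv, ih (m / 10) (Nat.div_lt_self (Nat.pos_of_ne_zero h) (by omega)) d]
      by_cases he : m % 10 = d
      · rw [if_neg (by simp [he]), he]
        simp
      · rw [if_pos (by exact_mod_cast he)]
        simp [he]

-- natLoop says: every digit produced equals d
theorem natLoop_iff : ∀ (m d : Nat), d < 10 →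
    (natLoop d m = true ↔ (m = 0 ∨ ∀ x ∈ Nat.toDigits 10 m, x = Nat.digitChar d)) := by
  intro m
  induction m using Nat.strong_induction_on with
  | _ m ih =>
    intro d hd
    by_cases h : m = 0
    · subst h; simp [natLoop]
    · rw [natLoop, if_neg h]
      have hd10 : m / 10 < m := Nat.div_lt_self (Nat.pos_of_ne_zero h) (by omega)
      simp only [Bool.and_eq_true, decide_eq_true_eq, ih (m / 10) hd10 d hd]
      constructor
      · rintro ⟨he, hrest⟩
        right
        rw [toDigits_concat m]
        intro x hx
        rcases List.mem_append.mp hx with hx | hx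
        · by_cases hlt : m < 10
          · rw [if_pos hlt] at hx; simp at hx
          · rw [if_neg hlt] at hx
            rcases hrest with h0 | hall
            · exfalso; omega
            · exact hall x hx
        · simp only [List.mem_singleton] at hx
          rw [hx, he]
      · rintro (h0 | hall)
        · exact absurd h0 h
        · constructor
          · have := hall (Nat.digitChar (m % 10)) (by rw [toDigits_concat m]; simp)
            exact digitChar_inj (Nat.mod_lt m (by omega)) hd this
          · by_cases hlt : m < 10
            · left; omega
            · right
              intro x hx
              apply hall
              rw [toDigits_concat m, if_neg hlt]
              exact List.mem_append_left _ hx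

-- all-equal-to-head equals all-equal-to-last on a nonempty concat
theorem allEq_headD_iff_concat (l' : List Char) (c : Char) :
    (∀ x ∈ l' ++ [c], x = (l' ++ [c]).headD ' ') ↔ (∀ x ∈ l' ++ [c], x = c) := by
  have hc : c ∈ l' ++ [c] := by simp
  have hh : (l' ++ [c]).headD ' ' ∈ l' ++ [c] := by cases l' <;> simp
  constructor
  · intro h x hx
    exact (h x hx).trans (h c hc).symm
  · intro h x hx
    exact (h x hx).trans (h _ hh).symm

-- ===== VERDICT (by name: the statement is the Claim_ definition above) =====
theorem is_repdigit_spec : Claim_equal_is_repdigit := by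
  intro num _
  unfold Spec_is_repdigit is_repdigit_alt
  by_cases h : num < 0
  · unfold is_repdigit
    rw [if_pos h, if_pos h]
  · rw [if_neg h, A_closed num h]
    -- pass to m := num.toNat
    obtain ⟨m, rfl⟩ : ∃ m : Nat, num = (m : Int) := ⟨num.toNat, (Int.toNat_of_nonneg (by omega)).symm⟩
    have hl : (PySem.Int.toStr (m : Int)).toList = Nat.toDigits 10 m := by
      rw [PySem.Int.toList_toStr]
      simp [PySem.Int.toChars, h]
    have hmod : PySem.Int.mod (m : Int) 10 = ((m % 10 : Nat) : Int) := by
      exact_mod_cast PySem.Int.mod_natCast m 10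
    have hdiv : PySem.Int.floordiv (m : Int) 10 = ((m / 10 : Nat) : Int) := by
      exact_mod_cast PySem.Int.floordiv_natCast m 10
    rw [hl, hmod, hdiv, altLoop_natCast (m / 10) (m % 10)]
    rw [Bool.eq_iff_iff, beq_iff_eq, natLoop_iff (m / 10) (m % 10) (Nat.mod_lt m (by omega))]
    rw [List.eq_replicate_iff]
    constructor
    · rintro ⟨-, hall⟩
      by_cases hlt : m < 10
      · left; omega
      · right
        intro x hx
        have hlast : ∀ y ∈ Nat.toDigits 10 m, y = Nat.digitChar (m % 10) := by
          rw [toDigits_concat m] at hall ⊢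
          exact (allEq_headD_iff_concat _ _).mp hall
        exact hlast x (by rw [toDigits_concat m, if_neg hlt]; exact List.mem_append_left _ hx)
    · intro hcase
      refine ⟨rfl, ?_⟩
      rw [toDigits_concat m]
      apply (allEq_headD_iff_concat _ _).mpr
      intro x hx
      rcases List.mem_append.mp hx with hx | hx
      · by_cases hlt : m < 10
        · rw [if_pos hlt] at hx; simp at hx
        · rw [if_neg hlt] at hx
          rcases hcase with h0 | hall
          · exfalso; omega
          · exact hall x hx
      · simpa using hx
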